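-- pv_equiv track=rewrite | github.com/LT-IntroToAI-SY2324/intro-to-python-EdogCPS | a1.py | every_other
-- ===== SOURCE A (Python) =====
-- from typing import List, TypeVar
--
-- T = TypeVar("T")
--
-- def every_other(lst: List[T]) -> List[T]:
--     exicute = True
--     toReturn = [0]
--     toReturn.pop()
--     for x in lst:
--         if exicute == True:
--             toReturn.append(x)
--         exicute = not exicute
--     return toReturn
--     raise NotImplementedError("every_other")
-- ===== SOURCE B (Python) =====
-- def every_other(lst):
--     return [lst[i] for i in range(0, len(lst), 2)]
-- ===== Notes on version B (the rewrite author's own statement) =====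
-- stated objective: idiomatic
-- what changed: Replaces the stateful toggle-flag full pass (flag flipped on every element, append when flag is true) with a direct index-strided comprehension over range(0, len(lst), 2), touching only the even positions.
import Mathlib
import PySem

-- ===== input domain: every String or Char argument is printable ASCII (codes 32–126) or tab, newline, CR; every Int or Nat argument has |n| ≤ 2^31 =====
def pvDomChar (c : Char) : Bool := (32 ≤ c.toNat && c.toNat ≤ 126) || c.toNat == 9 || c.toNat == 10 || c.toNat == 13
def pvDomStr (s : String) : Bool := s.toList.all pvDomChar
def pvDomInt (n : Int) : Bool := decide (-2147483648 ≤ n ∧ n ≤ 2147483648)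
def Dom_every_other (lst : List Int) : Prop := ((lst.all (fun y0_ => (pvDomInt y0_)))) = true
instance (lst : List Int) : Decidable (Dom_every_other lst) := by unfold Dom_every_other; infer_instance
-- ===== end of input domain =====

-- B replaces A's toggle-flag full pass with a direct stride over the even indices (idiomatic; same cost).

-- ===== PORT A =====
-- for x in lst: if exicute: toReturn.append(x); exicute = not exicute
def every_other (lst : List Int) : List Int :=
  (lst.foldl (fun (s : Bool × List Int) x => (!s.1, if s.1 = true then s.2 ++ [x] else s.2))
    (true, ([] : List Int))).2

-- ===== PORT B =====
-- [lst[i] for i in range(0, len(lst), 2)]; every index produced is in range, so pyGetD's default 0 is never used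
def every_other_alt (lst : List Int) : List Int :=
  (PySem.List.pyRange 0 (lst.length : Int) 2).map (fun i => PySem.List.pyGetD lst i 0)

-- ===== PRECONDITION & SPEC =====
def Spec_every_other (lst : List Int) (out : List Int) : Prop := out = every_other_alt lst
instance (lst : List Int) (out : List Int) : Decidable (Spec_every_other lst out) := by unfold Spec_every_other; infer_instance

-- ===== CLAIM (what is proved, stated in full; the proofs are below) =====
def Claim_equal_every_other : Prop := ∀ (lst : List Int), Dom_every_other lst → Spec_every_other lst (every_other lst)

-- ===== LEMMAS AND PROOFS =====

/-- The toggle-flag pass, as a two-state recursion. -/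
def pvAux : Bool → List Int → List Int
  | _, [] => []
  | true, x :: t => x :: pvAux false t
  | false, _ :: t => pvAux true t

lemma foldA (lst : List Int) (b : Bool) (acc : List Int) :
    (lst.foldl (fun (s : Bool × List Int) x => (!s.1, if s.1 = true then s.2 ++ [x] else s.2))
      (b, acc)).2 = acc ++ pvAux b lst := by
  induction lst generalizing b acc with
  | nil => simp [pvAux]
  | cons x t ih =>
    cases b <;> simp [pvAux, List.foldl_cons, ih]

lemma pyRange02 (n : ℕ) :
    PySem.List.pyRange 0 (n : Int) 2 = (List.range ((n + 1) / 2)).map (fun k : ℕ => (2 * (k : Int))) := by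
  rw [PySem.List.pyRange_of_pos 0 (n : Int) (by norm_num)]
  have h : (if (0 : Int) < (n : Int) then (((n : Int) - 0 + 2 - 1) / 2).toNat else 0) = (n + 1) / 2 := by
    split_ifs with h
    · omega
    · omega
  rw [h]
  apply List.map_congr_left
  intro k _
  ring

lemma gStep (a b : Int) (t : List Int) (k : ℕ) :
    PySem.List.pyGetD (a :: b :: t) (2 * ((k : Int) + 1)) 0 = PySem.List.pyGetD t (2 * (k : Int)) 0 := by
  rw [PySem.List.pyGetD_of_nonneg _ _ (by positivity),
      PySem.List.pyGetD_of_nonneg _ _ (by positivity)]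
  have h1 : (2 * ((k : Int) + 1)).toNat = (2 * (k : Int)).toNat + 1 + 1 := by omega
  rw [h1, List.getD_cons_succ, List.getD_cons_succ]

lemma g_eq : ∀ lst : List Int,
    (List.range ((lst.length + 1) / 2)).map (fun k : ℕ => PySem.List.pyGetD lst (2 * (k : Int)) 0)
      = pvAux true lst
  | [] => by simp [pvAux]
  | [a] => by simp [pvAux, PySem.List.pyGetD]
  | a :: b :: t => by
      have ih := g_eq t
      have hc : ((a :: b :: t).length + 1) / 2 = (t.length + 1) / 2 + 1 := by
        simp; omega
      rw [hc, List.range_succ_eq_map]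
      simp only [List.map_cons, List.map_map, Function.comp_def]
      rw [show pvAux true (a :: b :: t) = a :: pvAux true t from rfl]
      congr 1
      · norm_num [PySem.List.pyGetD]
      · rw [← ih]
        apply List.map_congr_left
        intro k _
        have := gStep a b t k
        push_cast at this ⊢
        exact this

lemma altAux (lst : List Int) : every_other_alt lst = pvAux true lst := by
  unfold every_other_alt
  rw [pyRange02 lst.length, List.map_map]
  simpa [Function.comp_def] using g_eq lst

-- ===== VERDICT (by name: the statement is the Claim_ definition above) =====
theorem every_other_spec : Claim_equal_every_other := by
  intro lst _
  unfold Spec_every_other every_other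
  rw [foldA, altAux]
  simp
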